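-- pv_equiv track=rewrite | github.com/haoxiang-xu/PuPu | miso_runtime/server/miso_adapter.py | _normalize_source_type_list
-- ===== SOURCE A (Python) =====
-- from typing import Any, Dict, Iterable, List
--
-- _ALLOWED_INPUT_SOURCE_TYPES = ("url", "base64")
--
-- def _normalize_source_type_list(raw_source_types: object) -> List[str]:
--     source_types = set()
--     if isinstance(raw_source_types, list):
--         for item in raw_source_types:
--             if not isinstance(item, str):
--                 continue
--             source_type = item.strip().lower()
--             if source_type in _ALLOWED_INPUT_SOURCE_TYPES:
--                 source_types.add(source_type)
--
--     return [source_type for source_type in _ALLOWED_INPUT_SOURCE_TYPES if source_type in source_types]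
-- ===== SOURCE B (Python) =====
-- _ALLOWED_INPUT_SOURCE_TYPES = ("url", "base64")
--
-- def _normalize_source_type_list(raw_source_types):
--     return [t for t in _ALLOWED_INPUT_SOURCE_TYPES
--             if isinstance(raw_source_types, list)
--             and any(isinstance(item, str) and item.strip().lower() == t
--                     for item in raw_source_types)]
-- ===== Notes on version B (the rewrite author's own statement) =====
-- stated objective: simpler
-- what changed: B drops A's intermediate set entirely: it is a single comprehension over the two fixed allowed types, deciding inclusion with an any-scan of the raw list per allowed type.
import Mathlib
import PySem

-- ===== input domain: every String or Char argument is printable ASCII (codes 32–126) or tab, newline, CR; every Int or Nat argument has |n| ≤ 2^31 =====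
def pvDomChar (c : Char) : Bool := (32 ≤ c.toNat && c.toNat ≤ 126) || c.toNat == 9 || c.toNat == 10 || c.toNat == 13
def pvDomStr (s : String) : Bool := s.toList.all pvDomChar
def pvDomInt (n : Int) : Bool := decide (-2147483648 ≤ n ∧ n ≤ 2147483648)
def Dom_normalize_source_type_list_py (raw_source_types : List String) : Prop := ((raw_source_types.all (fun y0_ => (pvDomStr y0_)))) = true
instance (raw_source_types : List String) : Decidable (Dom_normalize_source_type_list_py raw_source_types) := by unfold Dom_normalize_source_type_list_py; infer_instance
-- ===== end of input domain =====

-- ===== PORT A =====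
-- Header: B replaces A's set-building pass by a per-allowed-type any-scan (objective: simpler).
-- Lean inputs are List String, so Python's isinstance guards are vacuously true and not ported.
def pvAllowed : List String := ["url", "base64"]

def normalize_source_type_list_py (raw_source_types : List String) : List String :=
  let source_types : PySem.Set String :=
    raw_source_types.foldl (fun s item =>
      let source_type := PySem.Str.lower (PySem.Str.strip item)
      if pvAllowed.contains source_type then PySem.Set.add s source_type else s)
      PySem.Set.empty
  pvAllowed.filter (fun t => PySem.Set.contains source_types t)

-- ===== PORT B =====
def normalize_source_type_list_py_alt (raw_source_types : List String) : List String :=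
  pvAllowed.filter (fun t =>
    raw_source_types.any (fun item => PySem.Str.lower (PySem.Str.strip item) == t))

-- ===== PRECONDITION & SPEC =====
def Spec_normalize_source_type_list_py (raw_source_types : List String) (out : List String) : Prop := out = normalize_source_type_list_py_alt raw_source_types
instance (raw_source_types : List String) (out : List String) : Decidable (Spec_normalize_source_type_list_py raw_source_types out) := by unfold Spec_normalize_source_type_list_py; infer_instance

-- ===== CLAIM (what is proved, stated in full; the proofs are below) =====
def Claim_equal_normalize_source_type_list_py : Prop := ∀ (raw_source_types : List String), Dom_normalize_source_type_list_py raw_source_types → Spec_normalize_source_type_list_py raw_source_types (normalize_source_type_list_py raw_source_types)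

-- ===== LEMMAS AND PROOFS =====

-- ===== VERDICT (by name: the statement is the Claim_ definition above) =====
lemma contains_fold (xs : List String) (s : PySem.Set String) (t : String)
    (ht : pvAllowed.contains t) :
    PySem.Set.contains
      (xs.foldl (fun s item =>
        let source_type := PySem.Str.lower (PySem.Str.strip item)
        if pvAllowed.contains source_type then PySem.Set.add s source_type else s) s) t
    = (PySem.Set.contains s t ||
       xs.any (fun item => PySem.Str.lower (PySem.Str.strip item) == t)) := by
  induction xs generalizing s with
  | nil => simp
  | cons x xs ih =>
    simp only [List.foldl_cons, List.any_cons]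
    rw [ih]
    by_cases hx : pvAllowed.contains (PySem.Str.lower (PySem.Str.strip x))
    · simp only [hx, if_true]
      by_cases he : PySem.Str.lower (PySem.Str.strip x) = t
      · subst he
        simp [PySem.Set.contains_iff, PySem.Set.mem_add]
      · have : PySem.Set.contains (PySem.Set.add s (PySem.Str.lower (PySem.Str.strip x))) t
            = PySem.Set.contains s t := by
          simp [PySem.Set.contains_iff, PySem.Set.mem_add, (Ne.symm he)]
        rw [this, beq_eq_false_iff_ne.mpr he]
        simp
    · simp only [hx, if_false]
      have he : PySem.Str.lower (PySem.Str.strip x) ≠ t := by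
        intro h; exact hx (h ▸ ht)
      rw [beq_eq_false_iff_ne.mpr he]
      simp

theorem normalize_source_type_list_py_spec : Claim_equal_normalize_source_type_list_py := by
  intro xs _
  unfold Spec_normalize_source_type_list_py normalize_source_type_list_py
    normalize_source_type_list_py_alt
  simp only []
  apply List.filter_congr
  intro t ht
  rw [contains_fold xs PySem.Set.empty t (by simpa using ht)]
  simp [PySem.Set.empty]
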